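-- pv_equiv track=rewrite | github.com/HeyHo-Systems/booker | match_my_statements/match_my_statements.py | get_merchant_context
-- ===== SOURCE A (Python) =====
-- def get_merchant_context(descr: str) -> str:
--     """
--     Analyze merchant description to provide relevant context for matching.
--     Returns a string with known patterns and variations.
--     """
--     descr = descr.lower()
--     contexts = []
--
--     # Common SaaS/Cloud services patterns
--     if any(x in descr for x in ['cloud', 'api', 'hosting', 'subscription']):
--         contexts.append("This is a cloud/SaaS service which often has variations in billing descriptions.")
--         contexts.append("Monthly charges may vary slightly due to usage-based pricing.")
--
--     # Payment processors and financial services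
--     if any(x in descr for x in ['payment', 'stripe', 'paypal', 'billing']):
--         contexts.append("This is a payment processor which may show different merchant names for the same service.")
--
--     # Development tools and platforms
--     if any(x in descr for x in ['github', 'gitlab', 'vercel', 'heroku', 'twilio', 'openai']):
--         contexts.append("This is a development platform/tool with potential variations in product names.")
--         contexts.append("Charges might include product name, subscription tier, or usage period.")
--
--     # Fuel and travel
--     if any(x in descr for x in ['shell', 'bp', 'fuel', 'gas', 'tankstelle']):
--         contexts.append("This is a fuel/gas station purchase.")
--         contexts.append("Station numbers and location details may vary in descriptions.")
--
--     # Default context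
--     if not contexts:
--         contexts.append("This is a general merchant transaction.")
--
--     return " ".join(contexts)
-- ===== SOURCE B (Python) =====
-- _BLOCKS = [
--     ["This is a cloud/SaaS service which often has variations in billing descriptions.",
--      "Monthly charges may vary slightly due to usage-based pricing."],
--     ["This is a payment processor which may show different merchant names for the same service."],
--     ["This is a development platform/tool with potential variations in product names.",
--      "Charges might include product name, subscription tier, or usage period."],
--     ["This is a fuel/gas station purchase.",
--      "Station numbers and location details may vary in descriptions."],
-- ]
--
-- _KEYWORD_BITS = [("cloud", 0), ("api", 0), ("hosting", 0), ("subscription", 0),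
--                  ("payment", 1), ("stripe", 1), ("paypal", 1), ("billing", 1),
--                  ("github", 2), ("gitlab", 2), ("vercel", 2), ("heroku", 2),
--                  ("twilio", 2), ("openai", 2),
--                  ("shell", 3), ("bp", 3), ("fuel", 3), ("gas", 3), ("tankstelle", 3)]
--
-- # All 16 possible outputs, precomputed once from the category bitmask.
-- _TABLE = [
--     " ".join(msg for b in range(4) if (mask >> b) & 1 for msg in _BLOCKS[b])
--     or "This is a general merchant transaction."
--     for mask in range(16)
-- ]
--
-- def get_merchant_context(descr: str) -> str:
--     d = descr.lower()
--     mask = 0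
--     for kw, bit in _KEYWORD_BITS:
--         if kw in d:
--             mask |= 1 << bit
--     return _TABLE[mask]
-- ===== Notes on version B (the rewrite author's own statement) =====
-- stated objective: alternative
-- what changed: B computes a 4-bit category bitmask in one pass over a flat keyword-to-bit list and returns a string from a table of all 16 possible outputs precomputed once, instead of A's branch-by-branch list building and join per call.
import Mathlib
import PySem

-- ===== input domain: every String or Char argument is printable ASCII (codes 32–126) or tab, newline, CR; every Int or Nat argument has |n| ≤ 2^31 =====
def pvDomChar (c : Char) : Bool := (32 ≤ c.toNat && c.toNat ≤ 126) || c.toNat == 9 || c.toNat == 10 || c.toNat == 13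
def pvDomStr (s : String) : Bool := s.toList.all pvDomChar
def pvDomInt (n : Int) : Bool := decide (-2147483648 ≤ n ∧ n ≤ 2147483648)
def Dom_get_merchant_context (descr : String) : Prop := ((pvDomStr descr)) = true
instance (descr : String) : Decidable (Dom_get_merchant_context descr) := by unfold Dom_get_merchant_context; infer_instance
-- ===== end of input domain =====

-- B replaces A's branch-by-branch list building by a one-pass category bitmask plus a precomputed 16-entry output table (objective: alternative; return value only).


-- ===== PORT A =====
def get_merchant_context (descr : String) : String :=
  let d := PySem.Str.lower descr
  let contexts : List String := []
  let contexts := if ["cloud", "api", "hosting", "subscription"].any (fun x => PySem.Str.isIn x d) then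
      contexts ++ ["This is a cloud/SaaS service which often has variations in billing descriptions.",
                   "Monthly charges may vary slightly due to usage-based pricing."]
    else contexts
  let contexts := if ["payment", "stripe", "paypal", "billing"].any (fun x => PySem.Str.isIn x d) then
      contexts ++ ["This is a payment processor which may show different merchant names for the same service."]
    else contexts
  let contexts := if ["github", "gitlab", "vercel", "heroku", "twilio", "openai"].any (fun x => PySem.Str.isIn x d) then
      contexts ++ ["This is a development platform/tool with potential variations in product names.",
                   "Charges might include product name, subscription tier, or usage period."]
    else contexts
  let contexts := if ["shell", "bp", "fuel", "gas", "tankstelle"].any (fun x => PySem.Str.isIn x d) then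
      contexts ++ ["This is a fuel/gas station purchase.",
                   "Station numbers and location details may vary in descriptions."]
    else contexts
  let contexts := if contexts.isEmpty then
      contexts ++ ["This is a general merchant transaction."]
    else contexts
  PySem.Str.join " " contexts

-- ===== PORT B =====
-- B: per-category message blocks, a flat keyword→bit list, and the 16 possible outputs
-- precomputed once by bitmask; the function computes the mask in one pass and looks up.
def pvBlocks : List (List String) :=
  [ ["This is a cloud/SaaS service which often has variations in billing descriptions.",
     "Monthly charges may vary slightly due to usage-based pricing."],
    ["This is a payment processor which may show different merchant names for the same service."],
    ["This is a development platform/tool with potential variations in product names.",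
     "Charges might include product name, subscription tier, or usage period."],
    ["This is a fuel/gas station purchase.",
     "Station numbers and location details may vary in descriptions."] ]

def pvKeywordBits : List (String × Nat) :=
  [("cloud", 0), ("api", 0), ("hosting", 0), ("subscription", 0),
   ("payment", 1), ("stripe", 1), ("paypal", 1), ("billing", 1),
   ("github", 2), ("gitlab", 2), ("vercel", 2), ("heroku", 2), ("twilio", 2), ("openai", 2),
   ("shell", 3), ("bp", 3), ("fuel", 3), ("gas", 3), ("tankstelle", 3)]

def pvTable : List String :=
  (List.range 16).map (fun mask =>
    let s := PySem.Str.join " "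
      (((List.range 4).filter (fun b => (mask >>> b) &&& 1 == 1)).flatMap (fun b => pvBlocks.getD b []))
    if s == "" then "This is a general merchant transaction." else s)

def get_merchant_context_alt (descr : String) : String :=
  let d := PySem.Str.lower descr
  let mask := pvKeywordBits.foldl (fun m kb => if PySem.Str.isIn kb.1 d then m ||| (1 <<< kb.2) else m) 0
  pvTable.getD mask ""

-- ===== PRECONDITION & SPEC =====
def Spec_get_merchant_context (descr : String) (out : String) : Prop := out = get_merchant_context_alt descr
instance (descr : String) (out : String) : Decidable (Spec_get_merchant_context descr out) := by unfold Spec_get_merchant_context; infer_instance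

-- ===== CLAIM =====
def Claim_equal_get_merchant_context : Prop := ∀ (descr : String), Dom_get_merchant_context descr → Spec_get_merchant_context descr (get_merchant_context descr)

-- ===== LEMMAS AND PROOFS =====

-- folding one keyword group: the mask gains the group's bit iff any keyword matches
theorem pv_foldl_or_group (d : String) (kws : List String) (b acc : Nat) :
    (kws.map (fun k => (k, b))).foldl
        (fun m kb => if PySem.Str.isIn kb.1 d then m ||| (1 <<< kb.2) else m) acc
      = if kws.any (fun x => PySem.Str.isIn x d) then acc ||| (1 <<< b) else acc := by
  induction kws generalizing acc with
  | nil => simp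
  | cons k t ih =>
    simp only [List.map_cons, List.foldl_cons, List.any_cons]
    by_cases h : PySem.Str.isIn k d
    · simp only [h, if_pos, Bool.true_or, ih]
      split <;> simp
    · simp only [Bool.not_eq_true] at h
      simp only [h, ih, Bool.false_or, Bool.false_eq_true, if_false]

-- ===== VERDICT =====
set_option maxRecDepth 100000 in
theorem get_merchant_context_spec : Claim_equal_get_merchant_context := by
  intro descr _
  unfold Spec_get_merchant_context get_merchant_context get_merchant_context_alt
  have hk : pvKeywordBits
      = ((["cloud", "api", "hosting", "subscription"].map (fun k => (k, (0 : Nat))))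
        ++ (["payment", "stripe", "paypal", "billing"].map (fun k => (k, (1 : Nat))))
        ++ (["github", "gitlab", "vercel", "heroku", "twilio", "openai"].map (fun k => (k, (2 : Nat))))
        ++ (["shell", "bp", "fuel", "gas", "tankstelle"].map (fun k => (k, (3 : Nat))))) := by rfl
  rw [hk]
  simp only [List.foldl_append, pv_foldl_or_group]
  by_cases h0 : ["cloud", "api", "hosting", "subscription"].any (fun x => PySem.Str.isIn x (PySem.Str.lower descr)) <;>
  by_cases h1 : ["payment", "stripe", "paypal", "billing"].any (fun x => PySem.Str.isIn x (PySem.Str.lower descr)) <;>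
  by_cases h2 : ["github", "gitlab", "vercel", "heroku", "twilio", "openai"].any (fun x => PySem.Str.isIn x (PySem.Str.lower descr)) <;>
  by_cases h3 : ["shell", "bp", "fuel", "gas", "tankstelle"].any (fun x => PySem.Str.isIn x (PySem.Str.lower descr)) <;>
  simp only [h0, h1, h2, h3, if_true] <;> decide
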